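-- pv_equiv track=rewrite | github.com/Pixelatory/cosc4f90 | msabpso.py | posToStrings
-- ===== SOURCE A (Python) =====
-- def posToStrings(position, seq):
--     """Converts a list of sequences into a list of strings with indels, according to the position vector given.
--
--     :type position: list of (list of int)
--     :type seq: list of str
--     :rtype: list of str
--     """
--     result = []
--     i = 0
--     for bitlist in position:
--         j = 0
--         result.append("")
--         for bit in bitlist:
--             if bit == 0 and j < len(seq[i]):
--                 result[len(result) - 1] = result[len(result) - 1] + seq[i][j]
--                 j = j + 1
--             else:
--                 result[len(result) - 1] = result[len(result) - 1] + "-"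
--         i = i + 1
--     return result
-- ===== SOURCE B (Python) =====
-- def posToStrings(position, seq):
--     """Converts a list of sequences into a list of strings with indels, according to the position vector given.
--
--     Different decomposition: per row, build a dash template, list the
--     zero-bit slots, then fill those slots from the sequence by zip.
--     """
--     result = []
--     for i, bitlist in enumerate(position):
--         out = ['-'] * len(bitlist)
--         zeros = [k for k, b in enumerate(bitlist) if b == 0]
--         if zeros:
--             for pos, ch in zip(zeros, seq[i]):
--                 out[pos] = ch
--         result.append(''.join(out))
--     return result
-- ===== Notes on version B (the rewrite author's own statement) =====
-- stated objective: faster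
-- what changed: Replaces A's interleaved emit-per-bit loop (manual counters i, j, per-character string concatenation) with a per-row two-pass 'dash template, index the zero slots, fill by zip, join once' construction; B raises exactly where A raises.
import Mathlib
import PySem

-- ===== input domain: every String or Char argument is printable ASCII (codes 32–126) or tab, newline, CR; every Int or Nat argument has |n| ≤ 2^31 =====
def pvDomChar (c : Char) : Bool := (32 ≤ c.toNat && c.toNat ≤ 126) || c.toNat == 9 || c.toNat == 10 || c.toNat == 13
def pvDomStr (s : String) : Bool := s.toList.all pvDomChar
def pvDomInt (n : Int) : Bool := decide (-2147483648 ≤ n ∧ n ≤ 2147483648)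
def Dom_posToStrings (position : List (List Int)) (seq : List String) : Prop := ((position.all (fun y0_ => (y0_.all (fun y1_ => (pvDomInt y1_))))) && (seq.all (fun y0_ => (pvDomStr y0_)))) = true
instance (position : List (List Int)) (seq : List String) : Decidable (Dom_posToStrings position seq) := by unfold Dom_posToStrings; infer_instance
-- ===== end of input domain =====

-- B builds each row as a dash template whose zero-bit slots are indexed first and then
-- filled from the sequence by zip and joined once, instead of A's interleaved
-- emit-per-bit concatenation loop with manual counters i and j.

-- ===== PORT A =====
-- inner loop over bitlist; state: acc (the string built so far, as chars) and j.
-- seq[i] is fetched via pyGet?; under Pre_ (every access has i < seq.length) the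
-- `.getD ""` default is only reached for rows with no zero bit, where it is unused.
def pAinner (s : List Char) : List Int → Int → List Char → List Char
  | [], _, acc => acc
  | bit :: bits, j, acc =>
    if bit = 0 ∧ j < (s.length : Int) then
      pAinner s bits (j + 1) (acc ++ [s.getD j.toNat ' '])
    else
      pAinner s bits j (acc ++ ['-'])

-- outer loop over position; state: i and result.
def pAgo (seq : List String) : List (List Int) → Int → List String → List String
  | [], _, res => res
  | bl :: rest, i, res =>
      pAgo seq rest (i + 1)
        (res ++ [String.mk (pAinner (((PySem.List.pyGet? seq i).getD "").toList) bl 0 [])])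

def posToStrings (position : List (List Int)) (seq : List String) : List String :=
  pAgo seq position 0 []

-- ===== PORT B =====
-- zeros = [k for k, b in enumerate(bitlist) if b == 0]
def pBzeros : List Int → Nat → List Nat
  | [], _ => []
  | b :: bits, k => if b = 0 then k :: pBzeros bits (k + 1) else pBzeros bits (k + 1)

-- out = ['-'] * len(bitlist); if zeros: for pos, ch in zip(zeros, seq[i]): out[pos] = ch
-- (seq[i] is only fetched when zeros is nonempty, as in Source B; under Pre_ the fetch succeeds)
def pBrow (bits : List Int) (s? : Option String) : List Char :=
  let zeros := pBzeros bits 0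
  let out := List.replicate bits.length '-'
  if zeros = [] then out
  else (zeros.zip ((s?.getD "").toList)).foldl (fun o pc => o.set pc.1 pc.2) out

def posToStrings_alt (position : List (List Int)) (seq : List String) : List String :=
  (PySem.List.enumerate position 0).map
    (fun p => String.mk (pBrow p.2 (PySem.List.pyGet? seq p.1)))

-- ===== PRECONDITION & SPEC =====
-- Pre_ excludes exactly the inputs on which the Python A raises IndexError: a row of
-- position at index ≥ len(seq) containing a zero bit makes A (and B) access seq[i] out
-- of range; on every other input A returns normally and B matches it.
def Pre_posToStrings (position : List (List Int)) (seq : List String) : Prop :=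
  ∀ bl ∈ position.drop seq.length, (0 : Int) ∉ bl
instance (position : List (List Int)) (seq : List String) : Decidable (Pre_posToStrings position seq) := by unfold Pre_posToStrings; infer_instance

def pvWitness_posToStrings : List (List Int) × List String :=
  ([[0, 1, 0], [1]], ["ab", "c"])

def Spec_posToStrings (position : List (List Int)) (seq : List String) (out : List String) : Prop := out = posToStrings_alt position seq
instance (position : List (List Int)) (seq : List String) (out : List String) : Decidable (Spec_posToStrings position seq out) := by unfold Spec_posToStrings; infer_instance

-- ===== CLAIM =====
def Claim_equal_posToStrings : Prop := ∀ (position : List (List Int)) (seq : List String), Dom_posToStrings position seq → Pre_posToStrings position seq → Spec_posToStrings position seq (posToStrings position seq)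

-- ===== LEMMAS AND PROOFS =====

-- shared model of one row: consume a char per zero bit, a dash otherwise
def rowModel : List Int → List Char → List Char
  | [], _ => []
  | b :: bits, cs =>
    if b = 0 then
      match cs with
      | c :: cs' => c :: rowModel bits cs'
      | [] => '-' :: rowModel bits []
    else '-' :: rowModel bits cs

theorem rowModel_nil (bits : List Int) : rowModel bits [] = List.replicate bits.length '-' := by
  induction bits with
  | nil => rfl
  | cons b bits ih =>
    simp only [rowModel, List.length_cons, List.replicate_succ]
    split_ifs <;> simp [ih]

theorem rowModel_no_zero (bits : List Int) (h : (0 : Int) ∉ bits) (cs : List Char) :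
    rowModel bits cs = List.replicate bits.length '-' := by
  induction bits generalizing cs with
  | nil => rfl
  | cons b bits ih =>
    simp only [List.mem_cons, not_or] at h
    simp [rowModel, ih h.2 cs, List.replicate_succ]
    intro hb; exact absurd hb.symm h.1

-- A's inner loop computes the model on the remaining suffix of s
theorem pAinner_model (s : List Char) (bits : List Int) :
    ∀ (j : Nat) (acc : List Char),
      pAinner s bits (j : Int) acc = acc ++ rowModel bits (s.drop j) := by
  induction bits with
  | nil => intro j acc; simp [pAinner, rowModel]
  | cons b bits ih =>
    intro j acc
    simp only [pAinner, rowModel]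
    by_cases hb : b = 0
    · by_cases hj : j < s.length
      · have hcond : b = 0 ∧ (j : Int) < (s.length : Int) := ⟨hb, by exact_mod_cast hj⟩
        rw [if_pos hcond, if_pos hb]
        have : ((j : Int) + 1) = ((j + 1 : Nat) : Int) := by push_cast; ring
        rw [this, ih (j + 1)]
        rw [List.drop_eq_getElem_cons hj]
        simp [List.getD_eq_getElem?_getD, hj]
      · have hcond : ¬ (b = 0 ∧ (j : Int) < (s.length : Int)) := by
          intro ⟨_, h⟩; exact hj (by exact_mod_cast h)
        rw [if_neg hcond, if_pos hb, ih j]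
        have hdrop : s.drop j = [] := List.drop_eq_nil_of_le (by omega)
        rw [hdrop]
        simp
    · rw [if_neg (by tauto), if_neg hb, ih j]
      simp

-- zeros computed from start k are the zeros from 0, shifted by k
theorem pBzeros_shift (bits : List Int) :
    ∀ k, pBzeros bits k = (pBzeros bits 0).map (· + k) := by
  induction bits with
  | nil => intro k; simp [pBzeros]
  | cons b bits ih =>
    intro k
    simp only [pBzeros]
    split_ifs with hb
    · rw [ih (k + 1), ih 1]
      simp [List.map_map]
      intro a _; omega
    · rw [ih (k + 1), ih 1]
      rw [List.map_map]
      apply List.map_congr_left; intro a _; simp [Function.comp]; omega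

theorem pBzeros_nil_iff (bits : List Int) (k : Nat) :
    pBzeros bits k = [] ↔ (0 : Int) ∉ bits := by
  induction bits generalizing k with
  | nil => simp [pBzeros]
  | cons b bits ih =>
    simp only [pBzeros, List.mem_cons, not_or]
    split_ifs with hb
    · simp [hb]
    · simpa [ih (k + 1)] using fun _ => fun h => hb h.symm

-- filling shifted positions into d :: out fills the unshifted positions into out
theorem foldl_set_shift (pairs : List (Nat × Char)) :
    ∀ (d : Char) (out : List Char),
      (pairs.map (fun pc => (pc.1 + 1, pc.2))).foldl (fun o pc => o.set pc.1 pc.2) (d :: out)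
        = d :: pairs.foldl (fun o pc => o.set pc.1 pc.2) out := by
  induction pairs with
  | nil => intro d out; rfl
  | cons p ps ih =>
    intro d out
    simp only [List.map_cons, List.foldl_cons, List.set]
    exact ih d (out.set p.1 p.2)

-- the fill-from-replicate fold equals the model (for every cs)
theorem pBfill_model (bits : List Int) : ∀ cs : List Char,
    ((pBzeros bits 0).zip cs).foldl (fun o pc => o.set pc.1 pc.2)
        (List.replicate bits.length '-') = rowModel bits cs := by
  induction bits with
  | nil => intro cs; rfl
  | cons b bits ih =>
    intro cs
    simp only [pBzeros, List.length_cons, List.replicate_succ, rowModel]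
    by_cases hb : b = 0
    · rw [if_pos hb, if_pos hb]
      cases cs with
      | nil => simp [rowModel_nil]
      | cons c cs' =>
        simp only [List.zip_cons_cons, List.foldl_cons, List.set]
        rw [pBzeros_shift bits 1]
        have hz : ((pBzeros bits 0).map (· + 1)).zip cs'
            = ((pBzeros bits 0).zip cs').map (fun pc => (pc.1 + 1, pc.2)) := by
          rw [List.zip_map_left]
          apply List.map_congr_left; intro a _; rfl
        rw [hz, foldl_set_shift, ← ih cs']
    · rw [if_neg hb, if_neg hb]
      rw [pBzeros_shift bits 1]
      have hz : ((pBzeros bits 0).map (· + 1)).zip cs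
          = ((pBzeros bits 0).zip cs).map (fun pc => (pc.1 + 1, pc.2)) := by
        rw [List.zip_map_left]
        apply List.map_congr_left; intro a _; rfl
      rw [hz, foldl_set_shift, ← ih cs]

-- B's row equals the model of the fetched string (default "" when out of range)
theorem pBrow_model (bits : List Int) (s? : Option String) :
    pBrow bits s? = rowModel bits ((s?.getD "").toList) := by
  unfold pBrow
  by_cases hz : pBzeros bits 0 = []
  · rw [if_pos hz, rowModel_no_zero bits ((pBzeros_nil_iff bits 0).mp hz)]
  · rw [if_neg hz, pBfill_model]

-- A's outer loop produces exactly the enumerate-map B performs, row-for-row via the model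
theorem pAgo_model (seq : List String) (pos : List (List Int)) :
    ∀ (i : Int) (res : List String),
      pAgo seq pos i res
        = res ++ (PySem.List.enumerate pos i).map
            (fun p => String.mk (rowModel p.2 (((PySem.List.pyGet? seq p.1).getD "").toList))) := by
  induction pos with
  | nil => intro i res; simp [pAgo, PySem.List.enumerate_nil]
  | cons bl rest ih =>
    intro i res
    simp only [pAgo, PySem.List.enumerate_cons, List.map_cons]
    rw [ih (i + 1)]
    rw [show (0 : Int) = ((0 : Nat) : Int) from rfl,
      pAinner_model (((PySem.List.pyGet? seq i).getD "").toList) bl 0 []]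
    simp

-- ===== VERDICT =====
theorem posToStrings_spec : Claim_equal_posToStrings := by
  intro position seq _ _
  unfold Spec_posToStrings posToStrings posToStrings_alt
  rw [pAgo_model seq position 0 []]
  simp only [List.nil_append]
  apply List.map_congr_left
  intro p _
  rw [pBrow_model]
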